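-- pv_equiv track=rewrite | github.com/mo9mo9-uwu-mo9mo9/Kumihan-Formatter | kumihan_formatter/core/parsing/base/core_marker_parser.py | _contains_malicious_content
-- ===== SOURCE A (Python) =====
-- def _contains_malicious_content(content: str) -> bool:
--     """脚注内容に悪意のあるコンテンツが含まれているかチェック"""
--     if not content:
--         return False
--
--     malicious_patterns = ["<script", "javascript:", "data:", "vbscript:"]
--     content_lower = content.lower()
--     for pattern in malicious_patterns:
--         if pattern in content_lower:
--             return True
--     return False
-- ===== SOURCE B (Python) =====
-- def _contains_malicious_content(content: str) -> bool:
--     """脚注内容に悪意のあるコンテンツが含まれているかチェック"""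
--     low = content.lower()
--     for i, ch in enumerate(low):
--         if ch == "<" and low.startswith("script", i + 1):
--             return True
--         if ch == ":" and low.endswith(("javascript", "data", "vbscript"), 0, i):
--             return True
--     return False
-- ===== Notes on version B (the rewrite author's own statement) =====
-- stated objective: alternative
-- what changed: Instead of running four independent full substring scans, B makes one pass over the lowered string and only does work at the two trigger characters (the angle bracket that opens a tag and the colon that ends a scheme): there it checks whether the rest of a pattern starts right after, resp. whether a scheme name immediately precedes (endswith on the prefix).
import Mathlib
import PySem

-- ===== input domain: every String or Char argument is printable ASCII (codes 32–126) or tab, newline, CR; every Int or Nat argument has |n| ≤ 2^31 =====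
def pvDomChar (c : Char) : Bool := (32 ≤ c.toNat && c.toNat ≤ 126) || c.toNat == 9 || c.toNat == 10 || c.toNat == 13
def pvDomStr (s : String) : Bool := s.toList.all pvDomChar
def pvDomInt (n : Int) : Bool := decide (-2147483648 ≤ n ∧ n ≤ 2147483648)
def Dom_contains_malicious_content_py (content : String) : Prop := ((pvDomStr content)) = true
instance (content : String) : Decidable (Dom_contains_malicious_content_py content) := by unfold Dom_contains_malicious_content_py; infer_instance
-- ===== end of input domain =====

-- B makes one pass that only inspects trigger characters ('<' and ':') instead of
-- running four independent full substring scans (alternative algorithm, similar cost).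


-- ===== PORT A =====
-- A's pattern list, in order
def pvPatsA : List (List Char) :=
  ["<script".toList, "javascript:".toList, "data:".toList, "vbscript:".toList]

-- A's for-loop with early return: first pattern found in content_lower → True
def pvALoop (cl : List Char) : List (List Char) → Bool
  | [] => false
  | p :: ps => if PySem.Chars.isIn p cl then true else pvALoop cl ps

def contains_malicious_content_py (content : String) : Bool :=
  if content.toList.isEmpty then false
  else pvALoop (PySem.Chars.lower content.toList) pvPatsA

-- ===== PORT B =====
-- B's loop body over (i, ch) pairs of enumerate(low): at '<' check low.startswith("script", i+1),
-- at ':' check low.endswith(("javascript","data","vbscript"), 0, i); rest carries low.drop i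
def pvBLoop (low : List Char) : Nat → List Char → Bool
  | _, [] => false
  | i, c :: cs =>
    if c = '<' && PySem.Chars.startswith (low.drop (i + 1)) "script".toList then true
    else if c = ':' && (PySem.Chars.endswith (low.take i) "javascript".toList
                        || PySem.Chars.endswith (low.take i) "data".toList
                        || PySem.Chars.endswith (low.take i) "vbscript".toList) then true
    else pvBLoop low (i + 1) cs

def contains_malicious_content_py_alt (content : String) : Bool :=
  let low := PySem.Chars.lower content.toList
  pvBLoop low 0 low

-- ===== PRECONDITION & SPEC =====
def Spec_contains_malicious_content_py (content : String) (out : Bool) : Prop := out = contains_malicious_content_py_alt content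
instance (content : String) (out : Bool) : Decidable (Spec_contains_malicious_content_py content out) := by unfold Spec_contains_malicious_content_py; infer_instance

-- ===== CLAIM (what is proved, stated in full; the proofs are below) =====
def Claim_equal_contains_malicious_content_py : Prop := ∀ (content : String), Dom_contains_malicious_content_py content → Spec_contains_malicious_content_py content (contains_malicious_content_py content)

-- ===== LEMMAS AND PROOFS =====

-- the per-position condition B tests (getElem? keeps the bound implicit)
def pvCond (low : List Char) (j : Nat) : Prop :=
  (low[j]? = some '<' ∧ "script".toList <+: low.drop (j + 1)) ∨
  (low[j]? = some ':' ∧ ("javascript".toList <:+ low.take j ∨ "data".toList <:+ low.take j ∨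
                         "vbscript".toList <:+ low.take j))

-- A's loop: true iff some pattern occurs as a substring
theorem pvALoop_eq_true_iff (cl : List Char) (ps : List (List Char)) :
    pvALoop cl ps = true ↔ ∃ p ∈ ps, p <:+: cl := by
  induction ps with
  | nil => simp [pvALoop]
  | cons q qs ih =>
    simp only [pvALoop]
    by_cases h : PySem.Chars.isIn q cl = true
    · simp [h, (PySem.Chars.isIn_iff_infix q cl).mp h]
    · have h' : ¬ q <:+: cl := fun hc => h ((PySem.Chars.isIn_iff_infix q cl).mpr hc)
      simp [h, ih, h']

-- occurrence of '<' :: q ↔ trigger '<' with q following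
theorem pv_infix_lt (q low : List Char) :
    ('<' :: q) <:+: low ↔ ∃ i, low[i]? = some '<' ∧ q <+: low.drop (i + 1) := by
  constructor
  · rintro ⟨s, t, rfl⟩
    have heq : s ++ ('<' :: q) ++ t = s ++ '<' :: (q ++ t) := by simp
    refine ⟨s.length, ?_, ?_⟩
    · rw [heq, List.getElem?_append_right (le_refl _)]
      simp
    · have hdrop : List.drop (s.length + 1) (s ++ '<' :: (q ++ t)) = q ++ t := by
        rw [List.drop_append]
        simp
      rw [heq, hdrop]
      exact List.prefix_append q t
  · rintro ⟨i, hget, ⟨t, hq⟩⟩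
    have hi : i < low.length := by
      by_contra h
      rw [List.getElem?_eq_none (by omega)] at hget
      cases hget
    rw [List.getElem?_eq_getElem hi] at hget
    have hg : low[i] = '<' := Option.some.inj hget
    have hdrop : List.drop i low = '<' :: List.drop (i + 1) low := by
      rw [← List.getElem_cons_drop hi, hg]
    refine ⟨low.take i, t, ?_⟩
    calc low.take i ++ ('<' :: q) ++ t
        = low.take i ++ '<' :: (q ++ t) := by simp
      _ = low.take i ++ '<' :: low.drop (i + 1) := by rw [hq]
      _ = low := by rw [← hdrop, List.take_append_drop]

-- occurrence of q ++ [':'] ↔ trigger ':' with q before it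
theorem pv_infix_colon (q low : List Char) :
    (q ++ [':']) <:+: low ↔ ∃ i, low[i]? = some ':' ∧ q <:+ low.take i := by
  constructor
  · rintro ⟨s, t, rfl⟩
    have heq : s ++ (q ++ [':']) ++ t = (s ++ q) ++ ':' :: t := by simp
    refine ⟨(s ++ q).length, ?_, ?_⟩
    · rw [heq, List.getElem?_append_right (le_refl _)]
      simp
    · rw [heq, List.take_left]
      exact ⟨s, rfl⟩
  · rintro ⟨i, hget, ⟨u, hq⟩⟩
    have hi : i < low.length := by
      by_contra h
      rw [List.getElem?_eq_none (by omega)] at hget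
      cases hget
    rw [List.getElem?_eq_getElem hi] at hget
    have hg : low[i] = ':' := Option.some.inj hget
    have hdrop : List.drop i low = ':' :: List.drop (i + 1) low := by
      rw [← List.getElem_cons_drop hi, hg]
    refine ⟨u, low.drop (i + 1), ?_⟩
    calc u ++ (q ++ [':']) ++ (low.drop (i + 1))
        = (u ++ q) ++ ':' :: low.drop (i + 1) := by simp
      _ = low.take i ++ ':' :: low.drop (i + 1) := by rw [hq]
      _ = low := by rw [← hdrop, List.take_append_drop]

-- B's loop from position i: true iff some j ≥ i satisfies the trigger condition
theorem pvBLoop_iff (low : List Char) (i : Nat) (rest : List Char) (hrest : rest = low.drop i) :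
    pvBLoop low i rest = true ↔ ∃ j, i ≤ j ∧ pvCond low j := by
  induction rest generalizing i with
  | nil =>
    simp only [pvBLoop]
    constructor
    · intro h; cases h
    · rintro ⟨j, hij, hc⟩
      have hlen : low.length ≤ i := by
        by_contra h
        have := List.drop_eq_nil_iff.mp hrest.symm
        omega
      have hj : low[j]? = none := List.getElem?_eq_none (by omega)
      rcases hc with ⟨hg, -⟩ | ⟨hg, -⟩ <;> rw [hj] at hg <;> cases hg
  | cons c cs ih =>
    have hi : i < low.length := by
      by_contra h
      rw [List.drop_eq_nil_of_le (by omega)] at hrest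
      cases hrest
    have hc : low[i]? = some c := by
      have h := List.getElem?_drop (xs := low) (i := i) (j := 0)
      rw [← hrest] at h
      simpa using h.symm
    have hcs : cs = low.drop (i + 1) := by
      have h2 := congrArg (List.drop 1) hrest
      simpa [List.drop_drop, Nat.add_comm] using h2
    rw [hcs] at ih ⊢
    by_cases h1 : (c = '<' && PySem.Chars.startswith (low.drop (i + 1)) "script".toList) = true
    · simp only [pvBLoop, h1, if_true, true_iff]
      simp only [Bool.and_eq_true, decide_eq_true_eq] at h1
      exact ⟨i, le_refl i, Or.inl ⟨by rw [hc, h1.1],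
        (PySem.Chars.startswith_iff _ _).mp h1.2⟩⟩
    · by_cases h2 : (c = ':' && (PySem.Chars.endswith (low.take i) "javascript".toList
          || PySem.Chars.endswith (low.take i) "data".toList
          || PySem.Chars.endswith (low.take i) "vbscript".toList)) = true
      · simp only [pvBLoop, h1, h2, if_true, if_false, Bool.false_eq_true, true_iff]
        simp only [Bool.and_eq_true, Bool.or_eq_true, decide_eq_true_eq] at h2
        refine ⟨i, le_refl i, Or.inr ⟨by rw [hc, h2.1], ?_⟩⟩
        rcases h2.2 with (h | h) | h
        · exact Or.inl ((PySem.Chars.endswith_iff _ _).mp h)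
        · exact Or.inr (Or.inl ((PySem.Chars.endswith_iff _ _).mp h))
        · exact Or.inr (Or.inr ((PySem.Chars.endswith_iff _ _).mp h))
      · have hstep : pvBLoop low i (c :: low.drop (i + 1)) = pvBLoop low (i + 1) (low.drop (i + 1)) := by
          simp only [pvBLoop, h1, h2, Bool.false_eq_true, if_false]
        rw [hstep, ih (i + 1) rfl]
        constructor
        · rintro ⟨j, hij, hcond⟩
          exact ⟨j, by omega, hcond⟩
        · rintro ⟨j, hij, hcond⟩
          refine ⟨j, ?_, hcond⟩
          rcases Nat.lt_or_ge i j with h | h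
          · omega
          · exfalso
            have hji : j = i := by omega
            subst hji
            rcases hcond with ⟨hg, hpre⟩ | ⟨hg, hsuf⟩
            · rw [hc] at hg
              apply h1
              simp only [Bool.and_eq_true, decide_eq_true_eq]
              exact ⟨Option.some.inj hg,
                (PySem.Chars.startswith_iff _ _).mpr hpre⟩
            · rw [hc] at hg
              apply h2
              simp only [Bool.and_eq_true, Bool.or_eq_true, decide_eq_true_eq]
              refine ⟨Option.some.inj hg, ?_⟩
              rcases hsuf with h | h | h
              · exact Or.inl (Or.inl ((PySem.Chars.endswith_iff _ _).mpr h))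
              · exact Or.inl (Or.inr ((PySem.Chars.endswith_iff _ _).mpr h))
              · exact Or.inr ((PySem.Chars.endswith_iff _ _).mpr h)

-- the two characterisations coincide
theorem pv_main (cl : List Char) : pvALoop cl pvPatsA = pvBLoop cl 0 cl := by
  have hA := pvALoop_eq_true_iff cl pvPatsA
  have hB := pvBLoop_iff cl 0 cl (by simp)
  have hiff : pvALoop cl pvPatsA = true ↔ pvBLoop cl 0 cl = true := by
    rw [hA, hB]
    constructor
    · rintro ⟨p, hp, hinf⟩
      simp only [pvPatsA, List.mem_cons, List.not_mem_nil, or_false] at hp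
      rcases hp with rfl | rfl | rfl | rfl
      · obtain ⟨i, hg, hpre⟩ := (pv_infix_lt "script".toList cl).mp (by simpa using hinf)
        exact ⟨i, Nat.zero_le i, Or.inl ⟨hg, hpre⟩⟩
      · obtain ⟨i, hg, hsuf⟩ := (pv_infix_colon "javascript".toList cl).mp (by simpa using hinf)
        exact ⟨i, Nat.zero_le i, Or.inr ⟨hg, Or.inl hsuf⟩⟩
      · obtain ⟨i, hg, hsuf⟩ := (pv_infix_colon "data".toList cl).mp (by simpa using hinf)
        exact ⟨i, Nat.zero_le i, Or.inr ⟨hg, Or.inr (Or.inl hsuf)⟩⟩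
      · obtain ⟨i, hg, hsuf⟩ := (pv_infix_colon "vbscript".toList cl).mp (by simpa using hinf)
        exact ⟨i, Nat.zero_le i, Or.inr ⟨hg, Or.inr (Or.inr hsuf)⟩⟩
    · rintro ⟨j, -, hcond⟩
      rcases hcond with ⟨hg, hpre⟩ | ⟨hg, hsuf⟩
      · refine ⟨"<script".toList, by simp [pvPatsA], ?_⟩
        have := (pv_infix_lt "script".toList cl).mpr ⟨j, hg, hpre⟩
        simpa using this
      · rcases hsuf with h | h | h
        · refine ⟨"javascript:".toList, by simp [pvPatsA], ?_⟩
          have := (pv_infix_colon "javascript".toList cl).mpr ⟨j, hg, h⟩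
          simpa using this
        · refine ⟨"data:".toList, by simp [pvPatsA], ?_⟩
          have := (pv_infix_colon "data".toList cl).mpr ⟨j, hg, h⟩
          simpa using this
        · refine ⟨"vbscript:".toList, by simp [pvPatsA], ?_⟩
          have := (pv_infix_colon "vbscript".toList cl).mpr ⟨j, hg, h⟩
          simpa using this
  cases hA' : pvALoop cl pvPatsA <;> cases hB' : pvBLoop cl 0 cl <;> simp_all

-- ===== VERDICT (by name: the statement is the Claim_ definition above) =====
theorem contains_malicious_content_py_spec : Claim_equal_contains_malicious_content_py := by
  intro content _
  unfold Spec_contains_malicious_content_py contains_malicious_content_py contains_malicious_content_py_alt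
  by_cases h : content.toList.isEmpty
  · have h0 : content.toList = [] := List.isEmpty_iff.mp h
    simp [h0, PySem.Chars.lower, pvBLoop]
  · simp only [h, if_false, Bool.false_eq_true]
    exact pv_main (PySem.Chars.lower content.toList)
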